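-- pv_equiv track=rewrite | github.com/bcronmiller/vanguard-league | backend/app/services/tournament_engine.py | _swiss_pairing
-- ===== SOURCE A (Python) =====
-- from typing import List, Dict, Optional, Tuple
--
-- def _swiss_pairing(
--
--     standings: Dict[int, Dict],
--     matchup_history: Dict[int, set]
-- ) -> List[Tuple[int, Optional[int]]]:
--     """
--     Create pairings for next Swiss round.
--
--     Uses strength-based pairing: pair players with similar records.
--     Avoids rematches when possible.
--
--     Returns:
--         List of (player_a_id, player_b_id) tuples (player_b_id may be None for bye)
--     """
--     # Sort players by points (descending), then wins
--     sorted_players = sorted(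
--         standings.items(),
--         key=lambda x: (x[1]["points"], x[1]["wins"]),
--         reverse=True
--     )
--
--     player_ids = [p[0] for p in sorted_players]
--     paired = set()
--     pairings = []
--
--     for i, player_id in enumerate(player_ids):
--         if player_id in paired:
--             continue
--
--         # Find best opponent: similar record, haven't faced before
--         opponent_id = None
--         for j in range(i + 1, len(player_ids)):
--             candidate = player_ids[j]
--             if candidate in paired:
--                 continue
--
--             # Check if they've faced before
--             if candidate not in matchup_history.get(player_id, set()):
--                 opponent_id = candidate
--                 break
--
--         # If no valid opponent found due to rematch constraints,
--         # relax constraint and pair with closest available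
--         if opponent_id is None:
--             for j in range(i + 1, len(player_ids)):
--                 candidate = player_ids[j]
--                 if candidate not in paired:
--                     opponent_id = candidate
--                     break
--
--         if opponent_id:
--             pairings.append((player_id, opponent_id))
--             paired.add(player_id)
--             paired.add(opponent_id)
--         else:
--             # Odd number of players, this player gets a bye
--             pairings.append((player_id, None))
--             paired.add(player_id)
--
--     return pairings
-- ===== SOURCE B (Python) =====
-- from typing import List, Dict, Optional, Tuple
--
-- def _swiss_pairing(
--
--     standings: Dict[int, Dict],
--     matchup_history: Dict[int, set]
-- ) -> List[Tuple[int, Optional[int]]]: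
--     """Swiss pairing by consuming the sorted id list: pop the leader, pick the
--     first opponent not yet faced (else the first remaining), remove it, repeat."""
--     order = [pid for pid, _ in sorted(
--         standings.items(),
--         key=lambda x: (x[1]["points"], x[1]["wins"]),
--         reverse=True
--     )]
--     pairings = []
--     while order:
--         pid, rest = order[0], order[1:]
--         history = matchup_history.get(pid, set())
--         opponent_id = next((c for c in rest if c not in history), None)
--         if opponent_id is None and rest:
--             opponent_id = rest[0]
--         if opponent_id:
--             pairings.append((pid, opponent_id))
--             rest.remove(opponent_id)
--         else:
--             pairings.append((pid, None))
--         order = rest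
--     return pairings
-- ===== Notes on version B (the rewrite author's own statement) =====
-- stated objective: alternative
-- what changed: B replaces A's enumerate loop with a paired-set and two separate index-based inner scans by a list-consumption loop: pop the sorted leader, pick the first not-yet-faced opponent via next() with a rest[0] fallback, and remove the chosen opponent from the remaining list, so no paired set and no index arithmetic survive.
import Mathlib
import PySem

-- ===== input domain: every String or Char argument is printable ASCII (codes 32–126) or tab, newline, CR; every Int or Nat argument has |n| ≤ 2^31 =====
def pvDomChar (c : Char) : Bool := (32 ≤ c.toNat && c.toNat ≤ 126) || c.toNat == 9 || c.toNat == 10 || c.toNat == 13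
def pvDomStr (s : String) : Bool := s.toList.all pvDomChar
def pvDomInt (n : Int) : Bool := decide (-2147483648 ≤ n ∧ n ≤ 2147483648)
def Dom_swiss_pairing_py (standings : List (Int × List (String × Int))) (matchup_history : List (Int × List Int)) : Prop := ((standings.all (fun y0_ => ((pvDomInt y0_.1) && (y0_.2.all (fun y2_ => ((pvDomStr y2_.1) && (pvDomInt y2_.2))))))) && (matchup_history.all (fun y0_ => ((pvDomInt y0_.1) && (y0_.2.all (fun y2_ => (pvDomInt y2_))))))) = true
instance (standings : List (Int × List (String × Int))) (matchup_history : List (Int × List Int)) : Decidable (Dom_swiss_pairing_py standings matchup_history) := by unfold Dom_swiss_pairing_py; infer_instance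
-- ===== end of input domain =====

-- B replaces A's paired-set bookkeeping and its two index-based inner scans with a
-- list-consumption loop (pop the leader, find?/head? on the remaining list, remove the
-- chosen opponent); objective: alternative decomposition, equivalence proved below.

-- ===== PORT A =====
def aHist (matchup_history : List (Int × List Int)) (player_id : Int) : List Int :=
  (List.lookup player_id matchup_history).getD []

-- inner loop 1: for j in range(i+1, len): skip paired; first candidate not faced before
def aScanNew (player_ids paired hist : List Int) : List Int → Option Int
  | [] => none
  | j :: js =>
    match PySem.List.pyGet? player_ids j with
    | none => none   -- unreachable: j comes from range(len(player_ids))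
    | some candidate =>
      if paired.contains candidate then aScanNew player_ids paired hist js
      else if !hist.contains candidate then some candidate
      else aScanNew player_ids paired hist js

-- inner loop 2 (relaxed): first candidate not yet paired
def aScanAny (player_ids paired : List Int) : List Int → Option Int
  | [] => none
  | j :: js =>
    match PySem.List.pyGet? player_ids j with
    | none => none   -- unreachable
    | some candidate =>
      if !paired.contains candidate then some candidate
      else aScanAny player_ids paired js

-- outer loop over enumerate(player_ids) carrying the `paired` set
def aLoop (matchup_history : List (Int × List Int)) (player_ids : List Int) :
    List (Int × Int) → PySem.Set Int → List (Int × Option Int)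
  | [], _ => []
  | (i, player_id) :: enumRest, paired =>
    if paired.contains player_id then aLoop matchup_history player_ids enumRest paired
    else
      let firstTry := aScanNew player_ids paired (aHist matchup_history player_id)
        (PySem.List.pyRange (i + 1) player_ids.length)
      let opponent_id := match firstTry with
        | some c => some c
        | none => aScanAny player_ids paired (PySem.List.pyRange (i + 1) player_ids.length)
      match opponent_id with
      | some o =>
        if o ≠ 0 then   -- Python truthiness: `if opponent_id:`
          (player_id, some o) :: aLoop matchup_history player_ids enumRest ((paired.add player_id).add o)
        else
          (player_id, none) :: aLoop matchup_history player_ids enumRest (paired.add player_id)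
      | none =>
          (player_id, none) :: aLoop matchup_history player_ids enumRest (paired.add player_id)

def swiss_pairing_py (standings : List (Int × List (String × Int))) (matchup_history : List (Int × List Int)) : List (Int × Option Int) :=
  let sorted_players := PySem.List.sorted2 standings
    (fun x => (List.lookup "points" x.2).getD 0) (fun x => (List.lookup "wins" x.2).getD 0) true
  let player_ids := sorted_players.map (fun p => p.1)
  aLoop matchup_history player_ids ((PySem.List.pyRange 0 player_ids.length).zip player_ids) PySem.Set.empty

-- ===== PORT B =====
-- next((c for c in rest if c not in history), None), falling back to rest[0]
def bPickOpp (hist rest : List Int) : Option Int :=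
  match rest.find? (fun c => !hist.contains c) with
  | some c => some c
  | none => rest.head?

def bLoop (matchup_history : List (Int × List Int)) : List Int → List (Int × Option Int)
  | [] => []
  | pid :: rest =>
    match bPickOpp ((List.lookup pid matchup_history).getD []) rest with
    | some o =>
      if o ≠ 0 then   -- Python truthiness: `if opponent_id:`
        (pid, some o) :: bLoop matchup_history (rest.erase o)
      else
        (pid, none) :: bLoop matchup_history rest
    | none => (pid, none) :: bLoop matchup_history rest
  termination_by l => l.length
  decreasing_by
    all_goals first
      | exact Nat.lt_succ_of_le List.length_erase_le
      | exact Nat.lt_succ_self _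

def swiss_pairing_py_alt (standings : List (Int × List (String × Int))) (matchup_history : List (Int × List Int)) : List (Int × Option Int) :=
  bLoop matchup_history
    ((PySem.List.sorted2 standings
      (fun x => (List.lookup "points" x.2).getD 0) (fun x => (List.lookup "wins" x.2).getD 0) true).map (fun p => p.1))

-- ===== PRECONDITION & SPEC =====
-- Pre_ excludes (a) value dicts missing a "points" or "wins" key, on which A raises KeyError,
-- and (b) duplicate keys in any of the dict-valued arguments (outer standings / matchup_history
-- keys and the per-player value dicts), a defensible corner where the association-list
-- representation of a Python dict is ambiguous (Python keeps the last binding, first-match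
-- lookup the first).
def Pre_swiss_pairing_py (standings : List (Int × List (String × Int))) (matchup_history : List (Int × List Int)) : Prop :=
  (standings.map Prod.fst).Nodup ∧ (matchup_history.map Prod.fst).Nodup ∧
  ∀ p ∈ standings, (p.2.map Prod.fst).Nodup ∧
    (List.lookup "points" p.2).isSome ∧ (List.lookup "wins" p.2).isSome
instance (standings : List (Int × List (String × Int))) (matchup_history : List (Int × List Int)) : Decidable (Pre_swiss_pairing_py standings matchup_history) := by unfold Pre_swiss_pairing_py; infer_instance

def pvWitness_swiss_pairing_py : (List (Int × List (String × Int))) × (List (Int × List Int)) :=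
  ([(1, [("points", 3), ("wins", 1)]), (2, [("points", 0), ("wins", 0)]), (3, [("points", 3), ("wins", 0)])],
   [(1, [3]), (3, [1])])

def Spec_swiss_pairing_py (standings : List (Int × List (String × Int))) (matchup_history : List (Int × List Int)) (out : List (Int × Option Int)) : Prop := out = swiss_pairing_py_alt standings matchup_history
instance (standings : List (Int × List (String × Int))) (matchup_history : List (Int × List Int)) (out : List (Int × Option Int)) : Decidable (Spec_swiss_pairing_py standings matchup_history out) := by unfold Spec_swiss_pairing_py; infer_instance

-- ===== CLAIM (what is proved, stated in full; the proofs are below) =====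
def Claim_equal_swiss_pairing_py : Prop := ∀ (standings : List (Int × List (String × Int))) (matchup_history : List (Int × List Int)), Dom_swiss_pairing_py standings matchup_history → Pre_swiss_pairing_py standings matchup_history → Spec_swiss_pairing_py standings matchup_history (swiss_pairing_py standings matchup_history)

-- ===== LEMMAS AND PROOFS =====

lemma drop_facts {ids t : List Int} {c : Int} {i : Nat} (h : ids.drop i = c :: t) :
    i < ids.length ∧ ids.drop (i + 1) = t := by
  have hlen : (ids.drop i).length = ids.length - i := List.length_drop
  rw [h] at hlen
  constructor
  · simp at hlen; omega
  · have h2 : List.drop 1 (List.drop i ids) = List.drop (i + 1) ids := List.drop_drop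
    rw [h] at h2
    simpa using h2.symm

lemma pyGet_at {ids t : List Int} {c : Int} {i : Nat} (h : ids.drop i = c :: t) :
    PySem.List.pyGet? ids ((i : Int)) = some c := by
  have hi : i < ids.length := (drop_facts h).1
  rw [PySem.List.pyGet?_ofNat ids i hi]
  have h0 : (ids.drop i)[0]'(by simp [h]) = c := by simp [h]
  rw [List.getElem_drop] at h0
  simpa using h0

lemma range_nil {ids : List α} {i : Nat} (h : ids.drop i = ([] : List α)) :
    PySem.List.pyRange (i : Int) ids.length = [] := by
  have : ids.length ≤ i := by
    have hlen : (ids.drop i).length = ids.length - i := List.length_drop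
    rw [h] at hlen; simp at hlen; omega
  exact PySem.List.pyRange_one_eq_nil (by exact_mod_cast this)

lemma scanNew_eq (ids paired hist : List Int) :
    ∀ (t : List Int) (i : Nat), ids.drop i = t →
      aScanNew ids paired hist (PySem.List.pyRange (i : Int) ids.length) =
        (t.filter (fun c => !paired.contains c)).find? (fun c => !hist.contains c) := by
  intro t
  induction t with
  | nil =>
    intro i h
    rw [range_nil h]
    simp [aScanNew]
  | cons c t' ih =>
    intro i h
    obtain ⟨hi, hdrop'⟩ := drop_facts h
    rw [PySem.List.pyRange_one_cons (by exact_mod_cast hi), aScanNew, pyGet_at h]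
    dsimp only
    have hcast : ((i : Int) + 1) = ((i + 1 : Nat) : Int) := by push_cast; ring
    by_cases hp : paired.contains c
    · have hpm : c ∈ paired := by simpa using hp
      rw [if_pos hp, hcast, ih (i + 1) hdrop']
      have hfc : (c :: t').filter (fun x => !paired.contains x) =
          t'.filter (fun x => !paired.contains x) := by simp [hpm]
      rw [hfc]
    · have hpm : c ∉ paired := by simpa using hp
      rw [if_neg hp]
      have hfc : (c :: t').filter (fun x => !paired.contains x) =
          c :: t'.filter (fun x => !paired.contains x) := by simp [hpm]
      rw [hfc]
      by_cases hh : hist.contains c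
      · have hhm : c ∈ hist := by simpa using hh
        rw [if_neg (by simp [hhm]), hcast, ih (i + 1) hdrop',
          List.find?_cons_of_neg (by simp [hhm])]
      · have hhm : c ∉ hist := by simpa using hh
        rw [if_pos (by simp [hhm]), List.find?_cons_of_pos (by simp [hhm])]

lemma scanAny_eq (ids paired : List Int) :
    ∀ (t : List Int) (i : Nat), ids.drop i = t →
      aScanAny ids paired (PySem.List.pyRange (i : Int) ids.length) =
        (t.filter (fun c => !paired.contains c)).head? := by
  intro t
  induction t with
  | nil =>
    intro i h
    rw [range_nil h]
    simp [aScanAny]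
  | cons c t' ih =>
    intro i h
    obtain ⟨hi, hdrop'⟩ := drop_facts h
    rw [PySem.List.pyRange_one_cons (by exact_mod_cast hi), aScanAny, pyGet_at h]
    dsimp only
    have hcast : ((i : Int) + 1) = ((i + 1 : Nat) : Int) := by push_cast; ring
    by_cases hp : paired.contains c
    · have hpm : c ∈ paired := by simpa using hp
      rw [if_neg (by simp [hpm]), hcast, ih (i + 1) hdrop']
      have hfc : (c :: t').filter (fun x => !paired.contains x) =
          t'.filter (fun x => !paired.contains x) := by simp [hpm]
      rw [hfc]
    · have hpm : c ∉ paired := by simpa using hp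
      rw [if_pos (by simp [hpm])]
      have hfc : (c :: t').filter (fun x => !paired.contains x) =
          c :: t'.filter (fun x => !paired.contains x) := by simp [hpm]
      rw [hfc, List.head?_cons]

lemma filter_add_notmem (t : List Int) (paired : PySem.Set Int) (x : Int) (hx : x ∉ t) :
    t.filter (fun c => !List.contains (paired.add x) c) = t.filter (fun c => !List.contains paired c) := by
  apply List.filter_congr
  intro c hc
  have hcx : c ≠ x := fun he => hx (he ▸ hc)
  simp [hcx]

lemma filter_add_two (t : List Int) (paired : PySem.Set Int) (pid o : Int)
    (hpid : pid ∉ t) (hnd : t.Nodup) :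
    t.filter (fun c => !List.contains ((paired.add pid).add o) c) =
      (t.filter (fun c => !List.contains paired c)).erase o := by
  rw [(hnd.filter _).erase_eq_filter o, List.filter_filter]
  apply List.filter_congr
  intro c hc
  have hcp : c ≠ pid := fun he => hpid (he ▸ hc)
  by_cases hco : c = o
  · subst hco; simp
  · simp [hcp, hco]

lemma loop_eq (mh : List (Int × List Int)) (ids : List Int) (hnd : ids.Nodup) :
    ∀ (t : List Int) (i : Nat) (paired : PySem.Set Int), ids.drop i = t →
      aLoop mh ids ((PySem.List.pyRange (i : Int) ids.length).zip t) paired =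
        bLoop mh (t.filter (fun c => !List.contains paired c)) := by
  intro t
  induction t with
  | nil => intro i paired h; rw [List.zip_nil_right]; simp [aLoop, bLoop]
  | cons pid t' ih =>
    intro i paired h
    obtain ⟨hi, hdrop'⟩ := drop_facts h
    have hndt : (pid :: t').Nodup := h ▸ (hnd.sublist (List.drop_sublist i ids))
    have hpid : pid ∉ t' := by simp at hndt; exact hndt.1
    have hndt' : t'.Nodup := by simp at hndt; exact hndt.2
    rw [PySem.List.pyRange_one_cons (by exact_mod_cast hi), List.zip_cons_cons]
    simp only [aLoop]
    have hcast : ((i : Int) + 1) = ((i + 1 : Nat) : Int) := by push_cast; ring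
    by_cases hp : paired.contains pid
    · have hpm : pid ∈ paired := by simpa using hp
      rw [if_pos hp, hcast, ih (i + 1) paired hdrop']
      have hfc : (pid :: t').filter (fun x => !List.contains paired x) =
          t'.filter (fun x => !List.contains paired x) := by simp [hpm]
      rw [hfc]
    · have hpm : pid ∉ paired := by simpa using hp
      rw [if_neg hp]
      have hfc : (pid :: t').filter (fun x => !List.contains paired x) =
          pid :: t'.filter (fun x => !List.contains paired x) := by simp [hpm]
      rw [hfc, bLoop]
      rw [hcast, scanNew_eq ids paired (aHist mh pid) t' (i + 1) hdrop',
        scanAny_eq ids paired t' (i + 1) hdrop']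
      have hhist : (List.lookup pid mh).getD [] = aHist mh pid := rfl
      rw [hhist, bPickOpp]
      set tf := t'.filter (fun c => !List.contains paired c) with htf
      cases hfind : tf.find? (fun c => !(aHist mh pid).contains c) with
      | some o =>
        simp only
        by_cases ho : o = 0
        · subst ho
          simp only [ne_eq, not_true_eq_false, if_false]
          rw [ih (i + 1) (paired.add pid) hdrop', filter_add_notmem t' paired pid hpid]
        · rw [if_pos ho, if_pos ho, ih (i + 1) ((paired.add pid).add o) hdrop',
            filter_add_two t' paired pid o hpid hndt']
      | none =>
        simp only
        cases htfh : tf.head? with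
        | none =>
          simp only
          rw [ih (i + 1) (paired.add pid) hdrop', filter_add_notmem t' paired pid hpid]
        | some o =>
          simp only
          by_cases ho : o = 0
          · subst ho
            simp only [ne_eq, not_true_eq_false, if_false]
            rw [ih (i + 1) (paired.add pid) hdrop', filter_add_notmem t' paired pid hpid]
          · rw [if_pos ho, if_pos ho, ih (i + 1) ((paired.add pid).add o) hdrop',
              filter_add_two t' paired pid o hpid hndt']

-- ===== VERDICT (by name: the statement is the Claim_ definition above) =====
theorem swiss_pairing_py_spec : Claim_equal_swiss_pairing_py := by
  intro standings matchup_history _hdom hpre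
  unfold Spec_swiss_pairing_py swiss_pairing_py swiss_pairing_py_alt
  simp only
  set ids := (PySem.List.sorted2 standings
    (fun x => (List.lookup "points" x.2).getD 0) (fun x => (List.lookup "wins" x.2).getD 0) true).map
    (fun p => p.1) with hids
  have hnd : ids.Nodup := by
    have hperm : (PySem.List.sorted2 standings
        (fun x => (List.lookup "points" x.2).getD 0) (fun x => (List.lookup "wins" x.2).getD 0) true).Perm
        standings := PySem.List.sorted2_perm ..
    exact ((hperm.map Prod.fst).nodup_iff).mpr hpre.1
  have h0 : ((0 : Nat) : Int) = 0 := by norm_num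
  have := loop_eq matchup_history ids hnd ids 0 PySem.Set.empty (by simp)
  rw [h0] at this
  rw [this]
  congr 1
  simp [PySem.Set.empty]
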